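-- pv_equiv track=rewrite | github.com/tayque/horariux | backend/horarios/generator.py | _count_consecutive_days
-- ===== SOURCE A (Python) =====
-- def _count_consecutive_days(dias_list):
--     if len(dias_list) <= 1:
--         return 0
--     sorted_days = sorted(dias_list)
--     consecutive_count = 0
--     for i in range(len(sorted_days) - 1):
--         if sorted_days[i+1] - sorted_days[i] == 1:
--             consecutive_count += 1
--     return consecutive_count
-- ===== SOURCE B (Python) =====
-- def _count_consecutive_days(dias_list):
--     days = set(dias_list)
--     return sum(1 for v in days if v + 1 in days)
-- ===== Notes on version B (the rewrite author's own statement) =====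
-- stated objective: alternative
-- what changed: Replaced sort-then-scan-adjacent-pairs with a hash set: count distinct values v with v+1 also present (exactly one adjacent sorted pair differs by 1 per such distinct v).
import Mathlib
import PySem

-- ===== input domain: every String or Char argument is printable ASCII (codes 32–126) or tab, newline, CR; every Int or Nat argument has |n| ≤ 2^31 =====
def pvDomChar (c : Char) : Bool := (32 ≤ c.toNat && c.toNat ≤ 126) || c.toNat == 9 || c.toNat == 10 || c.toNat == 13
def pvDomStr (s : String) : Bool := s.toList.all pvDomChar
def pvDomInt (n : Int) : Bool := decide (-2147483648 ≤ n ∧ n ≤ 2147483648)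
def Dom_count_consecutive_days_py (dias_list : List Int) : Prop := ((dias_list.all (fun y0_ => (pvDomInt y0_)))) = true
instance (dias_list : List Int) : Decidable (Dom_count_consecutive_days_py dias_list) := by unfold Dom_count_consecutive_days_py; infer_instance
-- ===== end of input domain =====

-- B replaces A's sort + adjacent-pair scan by a set: count distinct v with v+1 also present (objective: alternative algorithm).

-- ===== PORT A =====
def count_consecutive_days_py (dias_list : List Int) : Int :=
  if dias_list.length ≤ 1 then 0
  else
    let sorted_days := PySem.List.sorted dias_list (fun x => x) false
    (PySem.List.pyRange 0 ((sorted_days.length : Int) - 1) 1).foldl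
      (fun acc i =>
        if PySem.List.pyGetD sorted_days (i + 1) 0 - PySem.List.pyGetD sorted_days i 0 = 1
        then acc + 1 else acc) 0

-- ===== PORT B =====
def count_consecutive_days_py_alt (dias_list : List Int) : Int :=
  let days : PySem.Set Int := PySem.Set.ofList dias_list
  ((days.filter (fun v => PySem.Set.contains days (v + 1))).length : Int)

-- ===== PRECONDITION & SPEC =====
def Spec_count_consecutive_days_py (dias_list : List Int) (out : Int) : Prop := out = count_consecutive_days_py_alt dias_list
instance (dias_list : List Int) (out : Int) : Decidable (Spec_count_consecutive_days_py dias_list out) := by unfold Spec_count_consecutive_days_py; infer_instance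

-- ===== CLAIM (what is proved, stated in full; the proofs are below) =====
def Claim_equal_count_consecutive_days_py : Prop := ∀ (dias_list : List Int), Dom_count_consecutive_days_py dias_list → Spec_count_consecutive_days_py dias_list (count_consecutive_days_py dias_list)

-- ===== LEMMAS AND PROOFS =====

-- structural adjacent-pair count on a list
def adjCount : List Int → Nat
  | a :: b :: t => (if b - a = 1 then 1 else 0) + adjCount (b :: t)
  | _ => 0

-- the set-side count: distinct values v of l with v + 1 also in l
def succCard (l : List Int) : Nat :=
  l.dedup.countP (fun v => decide ((v + 1) ∈ l))

lemma foldl_count (l : List Nat) (p : Nat → Bool) (init : Int) :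
    l.foldl (fun acc x => if p x then acc + 1 else acc) init = init + (l.countP p : Int) := by
  induction l generalizing init with
  | nil => simp
  | cons a t ih =>
    simp only [List.foldl_cons, List.countP_cons, ih]
    by_cases h : p a = true
    · simp [h]; ring
    · simp [h]

lemma countP_range_adj (s : List Int) :
    (List.range (s.length - 1)).countP
      (fun k => decide (s.getD (k + 1) 0 - s.getD k 0 = 1)) = adjCount s := by
  induction s with
  | nil => simp [adjCount]
  | cons a t ih =>
    cases t with
    | nil => simp [adjCount]
    | cons b t' =>
      have hlen : (a :: b :: t').length - 1 = ((b :: t').length - 1) + 1 := by simp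
      rw [hlen, List.range_succ_eq_map, List.countP_cons]
      simp only [List.countP_map]
      have hcomp :
          ((fun k => decide ((a :: b :: t').getD (k + 1) 0 - (a :: b :: t').getD k 0 = 1)) ∘
            (fun k => k + 1)) =
          (fun k => decide ((b :: t').getD (k + 1) 0 - (b :: t').getD k 0 = 1)) := by
        funext k
        simp
      rw [hcomp, ih, adjCount]
      simp [Nat.add_comm]

lemma mem_ge_of_sorted {a : Int} {t : List Int}
    (h : (a :: t).Pairwise (· ≤ ·)) : ∀ x ∈ a :: t, a ≤ x := by
  intro x hx
  rcases List.mem_cons.mp hx with rfl | hx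
  · exact le_refl x
  · exact (List.pairwise_cons.mp h).1 x hx

lemma adjCount_eq_succCard (s : List Int) (hs : s.Pairwise (· ≤ ·)) :
    adjCount s = succCard s := by
  induction s with
  | nil => simp [adjCount, succCard]
  | cons a t ih =>
    cases t with
    | nil =>
      simp only [adjCount, succCard]
      rw [List.dedup_cons_of_notMem (by simp), List.dedup_nil, List.countP_cons, List.countP_nil]
      simp
    | cons b t' =>
      have hab : a ≤ b := (List.pairwise_cons.mp hs).1 b (by simp)
      have ht : (b :: t').Pairwise (· ≤ ·) := (List.pairwise_cons.mp hs).2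
      have hge : ∀ x ∈ b :: t', b ≤ x := mem_ge_of_sorted ht
      have ihv := ih ht
      by_cases hEq : a = b
      · subst hEq
        have hded : (a :: a :: t').dedup = (a :: t').dedup :=
          List.dedup_cons_of_mem (by simp)
        have hcnt : (a :: t').dedup.countP (fun v => decide ((v + 1) ∈ a :: a :: t'))
            = (a :: t').dedup.countP (fun v => decide ((v + 1) ∈ a :: t')) := by
          apply List.countP_congr
          intro x _
          simp [List.mem_cons]
        rw [adjCount, succCard, hded, hcnt, ihv]
        simp [succCard]
      · have hlt : a < b := lt_of_le_of_ne hab hEq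
        have hanot : a ∉ b :: t' := fun hmem => absurd (hge a hmem) (not_le.mpr hlt)
        have hded : (a :: b :: t').dedup = a :: (b :: t').dedup :=
          List.dedup_cons_of_notMem hanot
        rw [adjCount, succCard, hded, List.countP_cons, ihv]
        have hhead : (decide ((a + 1) ∈ a :: b :: t')) = (decide (b - a = 1)) := by
          apply decide_eq_decide.mpr
          constructor
          · intro hmem
            rcases List.mem_cons.mp hmem with h1 | h2
            · omega
            · have := hge _ h2
              have hb : a + 1 ≤ b := hlt
              omega
          · intro hb
            have : a + 1 = b := by omega
            exact List.mem_cons.mpr (Or.inr (by simp [this]))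
        have htail : (b :: t').dedup.countP (fun v => decide ((v + 1) ∈ b :: t'))
            = (b :: t').dedup.countP (fun v => decide ((v + 1) ∈ a :: b :: t')) := by
          apply List.countP_congr
          intro x hx
          have hxb : b ≤ x := hge x (List.mem_dedup.mp hx)
          constructor
          · intro h
            exact decide_eq_true (List.mem_cons.mpr (Or.inr (of_decide_eq_true h)))
          · intro h
            rcases List.mem_cons.mp (of_decide_eq_true h) with h1 | h2
            · omega
            · exact decide_eq_true h2
        rw [succCard, ← htail, hhead]
        by_cases hb1 : b - a = 1 <;> simp [hb1, Nat.add_comm]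

lemma succCard_eq_alt (l : List Int) :
    count_consecutive_days_py_alt l = (succCard l : Int) := by
  unfold count_consecutive_days_py_alt
  dsimp only
  congr 1
  rw [← List.countP_eq_length_filter]
  unfold succCard
  have hperm : (PySem.Set.ofList l).Perm l.dedup := by
    apply (List.perm_ext_iff_of_nodup (PySem.Set.nodup_ofList l) l.nodup_dedup).mpr
    intro x
    rw [PySem.Set.mem_ofList, List.mem_dedup]
  rw [hperm.countP_eq]
  apply List.countP_congr
  intro x _
  rw [PySem.Set.contains_iff, PySem.Set.mem_ofList]
  exact (decide_eq_true_iff).symm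

lemma succCard_perm {l₁ l₂ : List Int} (h : l₁.Perm l₂) : succCard l₁ = succCard l₂ := by
  unfold succCard
  have hperm : l₁.dedup.Perm l₂.dedup := by
    apply (List.perm_ext_iff_of_nodup l₁.nodup_dedup l₂.nodup_dedup).mpr
    intro x
    rw [List.mem_dedup, List.mem_dedup]
    exact ⟨fun hx => h.mem_iff.mp hx, fun hx => h.mem_iff.mpr hx⟩
  rw [hperm.countP_eq]
  apply List.countP_congr
  intro x _
  rw [decide_eq_true_iff, decide_eq_true_iff]
  exact ⟨fun hx => h.mem_iff.mp hx, fun hx => h.mem_iff.mpr hx⟩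

-- ===== VERDICT (by name: the statement is the Claim_ definition above) =====
theorem count_consecutive_days_py_spec : Claim_equal_count_consecutive_days_py := by
  intro l _
  unfold Spec_count_consecutive_days_py count_consecutive_days_py
  rw [succCard_eq_alt]
  by_cases hlen : l.length ≤ 1
  · rw [if_pos hlen]
    interval_cases h : l.length
    · have : l = [] := List.length_eq_zero_iff.mp h
      subst this; simp [succCard]
    · rcases List.length_eq_one_iff.mp h with ⟨a, rfl⟩
      rw [succCard, List.dedup_cons_of_notMem (by simp), List.dedup_nil, List.countP_cons,
        List.countP_nil]
      simp
  · rw [if_neg hlen]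
    dsimp only
    set s := PySem.List.sorted l (fun x => x) false with hs
    have hperm : s.Perm l := PySem.List.sorted_perm l (fun x => x) false
    have hsort : s.Pairwise (· ≤ ·) := by
      have := PySem.List.sorted_pairwise l (fun x => x)
      simpa using this
    have hlcast : (s.length : Int) - 1 = ((s.length - 1 : Nat) : Int) := by
      have : 1 ≤ s.length := by
        have := hperm.length_eq
        omega
      omega
    rw [hlcast, PySem.List.pyRange_zero_natCast, List.foldl_map]
    have hbody :
        (fun (acc : Int) (k : Nat) =>
          (fun acc i =>
            if PySem.List.pyGetD s (i + 1) 0 - PySem.List.pyGetD s i 0 = 1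
            then acc + 1 else acc) acc ((k : Int)))
        = (fun (acc : Int) (k : Nat) =>
            if (fun k => decide (s.getD (k + 1) 0 - s.getD k 0 = 1)) k = true then acc + 1 else acc) := by
      funext acc k
      have h1 : ((k : Int)) + 1 = ((k + 1 : Nat) : Int) := by push_cast; ring
      simp only [h1, PySem.List.pyGetD_natCast]
      simp
    rw [hbody, foldl_count, countP_range_adj s, adjCount_eq_succCard s hsort,
      succCard_perm hperm]
    omega
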